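-- pv_equiv track=rewrite | github.com/adam147g/introduction-to-computer-science | Exercises/set 2/zestaw 2 - zad 8.py | f
-- ===== SOURCE A (Python) =====
-- def f(x):                               # f - czy_istnieje_suma_elementów_spójnych_fragmentów_ciągu_Fibonacciego
--     a, b = 1, 1
--     if x == 0 or x == 1 or x == 2:
--         return True
--     else:
--         while a + b <= x:
--             b = a + b
--             a = b - a
--             a_ = a
--             b_ = b
--             sum = 0
--             while (sum < x and b_ > 0):
--                 sum += b_
--                 a_ = b_ - a_
--                 b_ = b_ - a_
--             if sum == x:
--                 return True
--     return False
-- ===== SOURCE B (Python) =====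
-- def f(x):
--     if x == 0 or x == 1 or x == 2:
--         return True
--     fibs = []
--     a, b = 1, 1
--     while a <= x:
--         fibs.append(a)
--         a, b = b, a + b
--     prefix = [0]
--     for v in fibs:
--         prefix.append(prefix[-1] + v)
--     pset = set(prefix)
--     return any(p + x in pset for p in prefix)
-- ===== Notes on version B (the rewrite author's own statement) =====
-- stated objective: simpler
-- what changed: A rescans the Fibonacci sequence downward from every top element (nested loops); B builds the list of Fibonacci numbers <= x once, forms its prefix sums, and tests whether x is a difference of two prefix sums via one set-membership pass.
import Mathlib
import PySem

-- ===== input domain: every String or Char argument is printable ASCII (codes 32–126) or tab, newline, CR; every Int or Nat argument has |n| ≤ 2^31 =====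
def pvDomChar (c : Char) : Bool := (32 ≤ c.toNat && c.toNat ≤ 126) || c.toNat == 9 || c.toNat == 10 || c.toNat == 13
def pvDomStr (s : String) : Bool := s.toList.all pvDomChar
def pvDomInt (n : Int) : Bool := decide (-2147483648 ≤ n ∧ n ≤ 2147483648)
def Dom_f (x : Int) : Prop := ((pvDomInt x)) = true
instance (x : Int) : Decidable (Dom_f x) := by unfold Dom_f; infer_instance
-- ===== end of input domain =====

-- B replaces A's nested descending rescans by one prefix-sum list and a set lookup (same results; no speed claim).

-- ===== PORT A =====
-- inner 'while (sum < x and b_ > 0)' loop; fuel 100 never runs out for |x| ≤ 2^31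
def fInner (x : Int) : Nat → Int → Int → Int → Int
  | 0, s, _, _ => s
  | fuel+1, s, a, b =>
      if s < x ∧ 0 < b then
        let s' := s + b
        let a2 := b - a
        let b2 := b - a2
        fInner x fuel s' a2 b2
      else s

-- outer 'while a + b <= x' loop; fuel 100 never runs out for |x| ≤ 2^31
def fOuter (x : Int) : Nat → Int → Int → Bool
  | 0, _, _ => false
  | fuel+1, a, b =>
      if a + b ≤ x then
        let b' := a + b
        let a' := b' - a
        if fInner x 100 0 a' b' = x then true else fOuter x fuel a' b'
      else false

def f (x : Int) : Bool :=
  if x = 0 ∨ x = 1 ∨ x = 2 then true else fOuter x 100 1 1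

-- ===== PORT B =====
-- 'while a <= x: fibs.append(a); a, b = b, a+b'; fuel 100 never runs out for |x| ≤ 2^31
def fibAux (x : Int) : Nat → Int → Int → List Int
  | 0, _, _ => []
  | fuel+1, a, b => if a ≤ x then a :: fibAux x fuel b (a + b) else []

-- 'prefix = [0]; for v in fibs: prefix.append(prefix[-1] + v)'
def prefAux : Int → List Int → List Int
  | s, [] => [s]
  | s, v :: vs => s :: prefAux (s + v) vs

def f_alt (x : Int) : Bool :=
  if x = 0 ∨ x = 1 ∨ x = 2 then true
  else
    let fibs := fibAux x 100 1 1
    let pre := prefAux 0 fibs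
    let pset := PySem.Set.ofList pre
    pre.any (fun p => pset.contains (p + x))

-- ===== PRECONDITION & SPEC =====
def Spec_f (x : Int) (out : Bool) : Prop := out = f_alt x
instance (x : Int) (out : Bool) : Decidable (Spec_f x out) := by unfold Spec_f; infer_instance

-- ===== CLAIM (what is proved, stated in full; the proofs are below) =====
def Claim_equal_f : Prop := ∀ (x : Int), Dom_f x → Spec_f x (f x)

-- ===== LEMMAS AND PROOFS =====

-- the Fibonacci sequence 1, 1, 2, 3, 5, … (proof-only; neither port uses it)
def fibb : Nat → Int
  | 0 => 1
  | 1 => 1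
  | n+2 => fibb n + fibb (n+1)

theorem fibb_add2 (n : Nat) : fibb (n+2) = fibb n + fibb (n+1) := by
  simp [fibb]

theorem fibb_pos (n : Nat) : 1 ≤ fibb n := by
  induction n using fibb.induct with
  | case1 => simp [fibb]
  | case2 => simp [fibb]
  | case3 n ih1 ih2 => rw [fibb_add2]; omega

theorem fibb_le_succ (n : Nat) : fibb n ≤ fibb (n+1) := by
  cases n with
  | zero => simp [fibb]
  | succ m => have := fibb_pos m; rw [fibb_add2]; omega

theorem fibb_mono {n m : Nat} (h : n ≤ m) : fibb n ≤ fibb m := by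
  induction m with
  | zero => have : n = 0 := by omega
            subst this; exact le_refl _
  | succ m ih =>
      rcases Nat.lt_or_ge n (m+1) with h' | h'
      · exact le_trans (ih (by omega)) (fibb_le_succ m)
      · have : n = m + 1 := by omega
        subst this; exact le_refl _

theorem fibb_growth (k : Nat) : (2:Int)^k ≤ fibb (2*k) := by
  induction k with
  | zero => simp [fibb]
  | succ k ih =>
      have h1 : fibb (2*k) ≤ fibb (2*k+1) := fibb_le_succ _
      have h2 : 2*(k+1) = 2*k+2 := by ring
      rw [h2, fibb_add2, pow_succ]
      linarith

theorem fInner_stop (x : Int) (fuel : Nat) (s a b : Int) (h : ¬ s < x) :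
    fInner x fuel s a b = s := by
  cases fuel <;> simp [fInner, h]

theorem fInner_b0 (x : Int) (fuel : Nat) (s a : Int) :
    fInner x fuel s a 0 = s := by
  cases fuel <;> simp [fInner]

theorem fInner_char (x : Int) :
    ∀ (j fuel : Nat) (s : Int), j + 3 ≤ fuel → s < x →
      (fInner x fuel s (fibb j) (fibb (j+1)) = x ↔
        ∃ i : Nat, 1 ≤ i ∧ i ≤ j + 2 ∧ s + (fibb (j+3) - fibb i) = x) := by
  intro j
  induction j with
  | zero =>
      intro fuel s hf hs
      obtain ⟨m, rfl⟩ : ∃ m, fuel = m + 3 := ⟨fuel - 3, by omega⟩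
      have e1 : fibb 1 = 1 := rfl
      have e2 : fibb 2 = 2 := rfl
      have e3 : fibb 3 = 3 := rfl
      simp only [show fibb 0 = 1 from rfl, e1]
      by_cases h1 : s + 1 < x
      · have hev : fInner x (m+3) s 1 1 = s + 2 := by
          simp only [fInner, hs, h1]
          norm_num [fInner_b0]
          omega
        rw [hev]
        constructor
        · intro hv
          refine ⟨1, le_refl _, by omega, ?_⟩
          rw [e1, e3]; omega
        · rintro ⟨i, hi1, hi2, hv⟩
          interval_cases i
          · rw [e1, e3] at hv; omega
          · rw [e2, e3] at hv; omega
      · have hev : fInner x (m+3) s 1 1 = s + 1 := by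
          simp only [fInner, hs]
          norm_num [h1, fInner_stop x _ _ _ _ h1]
        rw [hev]
        constructor
        · intro hv
          refine ⟨2, by omega, by omega, ?_⟩
          rw [e2, e3]; omega
        · intro _; omega
  | succ j ih =>
      intro fuel s hf hs
      obtain ⟨m, rfl⟩ : ∃ m, fuel = m + 1 := ⟨fuel - 1, by omega⟩
      have hm : j + 3 ≤ m := by omega
      have hpos : (0:Int) < fibb (j+2) := by have := fibb_pos (j+2); omega
      have h4 : fibb (j+4) = fibb (j+2) + fibb (j+3) := fibb_add2 (j+2)
      have h3 : fibb (j+3) = fibb (j+1) + fibb (j+2) := fibb_add2 (j+1)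
      have hp1 := fibb_pos (j+1)
      simp only [show j+1+1 = j+2 from rfl, show j+1+2 = j+3 from rfl,
                 show j+1+3 = j+4 from rfl]
      have hstep : fInner x (m+1) s (fibb (j+1)) (fibb (j+2)) =
          fInner x m (s + fibb (j+2)) (fibb j) (fibb (j+1)) := by
        simp only [fInner, hs, hpos, and_true, if_pos]
        have ha2 : fibb (j+2) - fibb (j+1) = fibb j := by
          rw [fibb_add2]; ring
        rw [ha2]
        have hb2 : fibb (j+2) - fibb j = fibb (j+1) := by
          rw [fibb_add2]; ring
        rw [hb2]
      rw [hstep]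
      by_cases h1 : s + fibb (j+2) < x
      · rw [ih m (s + fibb (j+2)) hm h1]
        constructor
        · rintro ⟨i, hi1, hi2, hv⟩
          exact ⟨i, hi1, by omega, by omega⟩
        · rintro ⟨i, hi1, hi2, hv⟩
          by_cases hij : i = j + 3
          · subst hij; omega
          · exact ⟨i, hi1, by omega, by omega⟩
      · rw [fInner_stop x m _ _ _ h1]
        constructor
        · intro hv
          exact ⟨j+3, by omega, by omega, by omega⟩
        · rintro ⟨i, hi1, hi2, hv⟩
          by_cases hij : i = j + 3
          · subst hij; omega
          · have hmono : fibb i ≤ fibb (j+2) := fibb_mono (by omega)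
            omega

theorem fOuter_char (x : Int) (hx64 : x < fibb 64) :
    ∀ (fuel k : Nat), x < fibb (k + fuel + 1) →
      (fOuter x fuel (fibb k) (fibb (k+1)) = true ↔
        ∃ m : Nat, k + 2 ≤ m ∧ fibb m ≤ x ∧
          ∃ i : Nat, 1 ≤ i ∧ i ≤ m + 1 ∧ fibb (m+2) - fibb i = x) := by
  intro fuel
  induction fuel with
  | zero =>
      intro k hk
      constructor
      · intro h; simp [fOuter] at h
      · rintro ⟨m, hm, hmx, -⟩
        exfalso
        have h1 : fibb (k+1) ≤ fibb m := fibb_mono (by omega)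
        have h2 : x < fibb (k+1) := hk
        omega
  | succ fuel ih =>
      intro k hk
      have h2 : fibb (k+2) = fibb k + fibb (k+1) := fibb_add2 k
      by_cases hg : fibb k + fibb (k+1) ≤ x
      · -- loop body runs with top fibb (k+2)
        have hgx : fibb (k+2) ≤ x := by omega
        have hk64 : k + 2 < 64 := by
          by_contra hc
          have : fibb 64 ≤ fibb (k+2) := fibb_mono (by omega)
          omega
        have hxpos : (0:Int) < x := by have := fibb_pos (k+2); omega
        have hstep : fOuter x (fuel+1) (fibb k) (fibb (k+1)) =
            (if fInner x 100 0 (fibb (k+1)) (fibb (k+2)) = x then true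
             else fOuter x fuel (fibb (k+1)) (fibb (k+2))) := by
          simp only [fOuter, hg, if_pos]
          rw [← h2]
          have ha : fibb (k+2) - fibb k = fibb (k+1) := by omega
          rw [ha]
        rw [hstep]
        have hinner := fInner_char x (k+1) 100 0 (by omega) hxpos
        have hrec := ih (k+1) (by
          have : k + 1 + fuel + 1 = k + (fuel+1) + 1 := by omega
          rw [this]; exact hk)
        simp only [show k+1+1 = k+2 from rfl, show k+1+2 = k+3 from rfl,
                   show k+1+3 = k+4 from rfl] at hinner hrec
        by_cases hhit : fInner x 100 0 (fibb (k+1)) (fibb (k+2)) = x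
        · rw [if_pos hhit]
          simp only [true_iff]
          obtain ⟨i, hi1, hi2, hv⟩ := hinner.mp hhit
          exact ⟨k+2, by omega, hgx, i, hi1, by omega,
            by show fibb (k+4) - fibb i = x; omega⟩
        · rw [if_neg hhit, hrec]
          constructor
          · rintro ⟨m, hm, hmx, hrest⟩
            exact ⟨m, by omega, hmx, hrest⟩
          · rintro ⟨m, hm, hmx, i, hi1, hi2, hv⟩
            by_cases hmk : m = k + 2
            · subst hmk
              have hv' : fibb (k+4) - fibb i = x := hv
              exact absurd (hinner.mpr ⟨i, hi1, hi2, by omega⟩) hhit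
            · exact ⟨m, by omega, hmx, i, hi1, hi2, hv⟩
      · constructor
        · intro h
          simp [fOuter, hg] at h
        · rintro ⟨m, hm, hmx, -⟩
          exfalso
          have : fibb (k+2) ≤ fibb m := fibb_mono (by omega)
          omega

theorem prefAux_mem (x : Int) :
    ∀ (fuel k : Nat) (s z : Int), x < fibb (k + fuel) →
      (z ∈ prefAux s (fibAux x fuel (fibb k) (fibb (k+1))) ↔
        z = s ∨ ∃ t : Nat, fibb (k+t) ≤ x ∧ z = s + (fibb (k+t+2) - fibb (k+1))) := by
  intro fuel
  induction fuel with
  | zero =>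
      intro k s z hk
      simp only [fibAux, prefAux, List.mem_singleton]
      constructor
      · intro h; exact Or.inl h
      · rintro (h | ⟨t, htx, -⟩)
        · exact h
        · exfalso
          have h1 : fibb k ≤ fibb (k+t) := fibb_mono (by omega)
          have h2 : x < fibb k := hk
          omega
  | succ fuel ih =>
      intro k s z hk
      have h2 : fibb (k+2) = fibb k + fibb (k+1) := fibb_add2 k
      by_cases hg : fibb k ≤ x
      · have hlist : fibAux x (fuel+1) (fibb k) (fibb (k+1)) =
            fibb k :: fibAux x fuel (fibb (k+1)) (fibb (k+2)) := by
          simp only [fibAux, hg, if_pos]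
          rw [← h2]
        rw [hlist]
        simp only [prefAux, List.mem_cons]
        have hrec := ih (k+1) (s + fibb k) z (by
          have : k + 1 + fuel = k + (fuel + 1) := by omega
          rw [this]; exact hk)
        simp only [show k+1+1 = k+2 from rfl] at hrec
        rw [hrec]
        constructor
        · rintro (h | h | ⟨t, htx, hv⟩)
          · exact Or.inl h
          · refine Or.inr ⟨0, hg, ?_⟩
            show z = s + (fibb (k+2) - fibb (k+1))
            omega
          · refine Or.inr ⟨t+1, ?_, ?_⟩
            · show fibb (k+t+1) ≤ x
              have : k+1+t = k+t+1 := by omega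
              rw [this] at htx; exact htx
            · show z = s + (fibb (k+t+3) - fibb (k+1))
              have hv' : z = s + fibb k + (fibb (k+t+3) - fibb (k+2)) := by
                have : k+t+3 = k+1+t+2 := by omega
                rw [this]; exact hv
              omega
        · rintro (h | ⟨t, htx, hv⟩)
          · exact Or.inl h
          · cases t with
            | zero =>
                refine Or.inr (Or.inl ?_)
                have hv' : z = s + (fibb (k+2) - fibb (k+1)) := hv
                omega
            | succ t =>
                refine Or.inr (Or.inr ⟨t, ?_, ?_⟩)
                · show fibb (k+1+t) ≤ x
                  have : k+1+t = k+(t+1) := by omega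
                  rw [this]; exact htx
                · show z = s + fibb k + (fibb (k+1+t+2) - fibb (k+2))
                  have hv' : z = s + (fibb (k+t+3) - fibb (k+1)) := hv
                  have : k+1+t+2 = k+t+3 := by omega
                  rw [this]
                  omega
      · have hlist : fibAux x (fuel+1) (fibb k) (fibb (k+1)) = [] := by
          simp only [fibAux, hg, if_false]
        rw [hlist]
        simp only [prefAux, List.mem_singleton]
        constructor
        · intro h; exact Or.inl h
        · rintro (h | ⟨t, htx, -⟩)
          · exact h
          · exfalso
            have h1 : fibb k ≤ fibb (k+t) := fibb_mono (by omega)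
            omega

-- the two loop characterizations describe the same set of contiguous-Fibonacci sums
theorem pred_equiv (x : Int) (hc0 : x ≠ 0) (hc1 : x ≠ 1) (hc2 : x ≠ 2) :
    (∃ m : Nat, 2 ≤ m ∧ fibb m ≤ x ∧
        ∃ i : Nat, 1 ≤ i ∧ i ≤ m + 1 ∧ fibb (m+2) - fibb i = x)
    ↔ (∃ p : Int, (p = 0 ∨ ∃ t : Nat, fibb t ≤ x ∧ p = fibb (t+2) - 1) ∧
        (p + x = 0 ∨ ∃ t : Nat, fibb t ≤ x ∧ p + x = fibb (t+2) - 1)) := by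
  constructor
  · rintro ⟨m, hm, hmx, i, hi1, hi2, hv⟩
    refine ⟨fibb i - 1, ?_, ?_⟩
    · by_cases hi : i = 1
      · subst hi
        left
        have e1 : fibb 1 = 1 := rfl
        omega
      · right
        refine ⟨i - 2, ?_, ?_⟩
        · have : fibb (i-2) ≤ fibb m := fibb_mono (by omega)
          omega
        · have h : i - 2 + 2 = i := by omega
          rw [h]
    · right
      exact ⟨m, hmx, by omega⟩
  · rintro ⟨p, hp, hq⟩
    have hx3 : 3 ≤ x := by
      rcases hq with hq0 | ⟨j, hjx, hjv⟩
      · exfalso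
        rcases hp with hp0 | ⟨t, htx, htv⟩
        · omega
        · have h1 := fibb_pos t
          have h2 := fibb_pos (t+2)
          omega
      · have := fibb_pos j
        omega
    rcases hq with hq0 | ⟨j, hjx, hjv⟩
    · exfalso
      rcases hp with hp0 | ⟨t, htx, htv⟩
      · omega
      · have h1 := fibb_pos t
        have h2 := fibb_pos (t+2)
        omega
    rcases hp with hp0 | ⟨i', hix, hiv⟩
    · have hxval : x = fibb (j+2) - 1 := by omega
      have hj2 : 2 ≤ j := by
        by_contra hj
        interval_cases j
        · have e : fibb (0+2) = 2 := rfl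
          omega
        · have e : fibb (1+2) = 3 := rfl
          omega
      refine ⟨j, hj2, hjx, 1, le_refl _, by omega, ?_⟩
      have e1 : fibb 1 = 1 := rfl
      omega
    · have hxval : fibb (j+2) - fibb (i'+2) = x := by omega
      have hij : i' < j := by
        by_contra hij
        have : fibb (j+2) ≤ fibb (i'+2) := fibb_mono (by omega)
        omega
      have hj2 : 2 ≤ j := by
        rcases Nat.lt_or_ge j 2 with hj | hj
        · exfalso
          interval_cases j
          · omega
          · have hi0 : i' = 0 := by omega
            subst hi0
            have e3 : fibb (1+2) = 3 := rfl
            have e2 : fibb (0+2) = 2 := rfl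
            omega
        · exact hj
      exact ⟨j, hj2, hjx, i'+2, by omega, by omega, hxval⟩

-- ===== VERDICT (by name: the statement is the Claim_ definition above) =====
theorem f_spec : Claim_equal_f := by
  intro x hdom
  unfold Spec_f
  have hx : -2147483648 ≤ x ∧ x ≤ 2147483648 := by
    simpa [Dom_f, pvDomInt] using hdom
  have hx64 : x < fibb 64 := by
    have hg := fibb_growth 32
    have h1 : fibb (2*32) = fibb 64 := rfl
    have h2 : (2:Int)^32 = 4294967296 := by norm_num
    omega
  unfold f f_alt
  by_cases hc : x = 0 ∨ x = 1 ∨ x = 2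
  · simp [hc]
  · rw [if_neg hc, if_neg hc]
    have hA := fOuter_char x hx64 100 0 (by
      have h := fibb_mono (show (64:Nat) ≤ 0+100+1 by omega)
      omega)
    simp only [show fibb 0 = (1:Int) from rfl, show fibb (0+1) = (1:Int) from rfl,
               Nat.zero_add] at hA
    have hmem : ∀ z : Int, z ∈ prefAux 0 (fibAux x 100 1 1) ↔
        z = 0 ∨ ∃ t : Nat, fibb t ≤ x ∧ z = fibb (t+2) - 1 := by
      intro z
      have h := prefAux_mem x 100 0 0 z (by
        have h := fibb_mono (show (64:Nat) ≤ 0+100 by omega)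
        omega)
      simp only [show fibb 0 = (1:Int) from rfl, show fibb (0+1) = (1:Int) from rfl,
                 zero_add] at h
      exact h
    show fOuter x 100 1 1 =
      (prefAux 0 (fibAux x 100 1 1)).any
        (fun p => PySem.Set.contains (PySem.Set.ofList (prefAux 0 (fibAux x 100 1 1))) (p + x))
    have hB : ((prefAux 0 (fibAux x 100 1 1)).any
        (fun p => PySem.Set.contains (PySem.Set.ofList (prefAux 0 (fibAux x 100 1 1))) (p + x)) = true)
        ↔ ∃ p : Int, p ∈ prefAux 0 (fibAux x 100 1 1) ∧
            (p + x) ∈ prefAux 0 (fibAux x 100 1 1) := by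
      simp [List.any_eq_true, PySem.Set.mem_ofList]
    rw [Bool.eq_iff_iff, hA, hB]
    push Not at hc
    obtain ⟨hc0, hc1, hc2⟩ := hc
    rw [pred_equiv x hc0 hc1 hc2]
    constructor
    · rintro ⟨p, hp, hq⟩
      exact ⟨p, (hmem p).mpr hp, (hmem (p+x)).mpr hq⟩
    · rintro ⟨p, hp, hq⟩
      exact ⟨p, (hmem p).mp hp, (hmem (p+x)).mp hq⟩
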